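-- pv_equiv track=rewrite | github.com/HumanMD/vlc_controller_project | threads/ProducerThread.py | classic_check
-- ===== SOURCE A (Python) =====
-- def classic_check(message):
--     messages = message.split(',')
--     actions = ['start', 'stop']
--     parameters = ['1', '2', '3', '4']
--
--     if (len(messages) == 2) \
--             and \
--             (any(x == messages[0] for x in actions)) \
--             and \
--             (any(x == messages[1] for x in parameters)):
--         return True
-- ===== SOURCE B (Python) =====
-- def classic_check(message):
--     valid = {','.join((a, p)) for a in ('start', 'stop') for p in ('1', '2', '3', '4')}
--     if message in valid:
--         return True
-- ===== Notes on version B (the rewrite author's own statement) =====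
-- stated objective: simpler
-- what changed: Instead of splitting the message at the comma and checking piece count plus per-field membership, B precomputes the 8 valid complete messages as a product set and does a single whole-string membership test.
import Mathlib
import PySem

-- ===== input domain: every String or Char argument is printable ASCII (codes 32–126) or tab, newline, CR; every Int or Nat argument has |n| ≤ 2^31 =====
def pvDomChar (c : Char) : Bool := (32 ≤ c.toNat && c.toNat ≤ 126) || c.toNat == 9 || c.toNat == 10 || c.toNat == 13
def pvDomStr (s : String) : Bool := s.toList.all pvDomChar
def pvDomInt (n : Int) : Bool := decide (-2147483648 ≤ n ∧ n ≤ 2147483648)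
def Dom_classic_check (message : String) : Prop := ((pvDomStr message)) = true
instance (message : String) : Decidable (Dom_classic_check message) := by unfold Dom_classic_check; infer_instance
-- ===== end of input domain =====

-- B replaces A's split/length/per-field checks by a single membership test of the whole
-- message in the precomputed product set of the 8 valid messages (objective: simpler).

-- ===== PORT A =====
-- split? with the literal nonempty separator "," is always `some`; `.getD []` only totalizes it.
def classic_check (message : String) : Option Bool :=
  let messages := (PySem.Str.split? message ",").getD []
  let actions : List String := ["start", "stop"]
  let parameters : List String := ["1", "2", "3", "4"]
  if messages.length = 2
      ∧ actions.any (fun x => x == messages.getD 0 "") = true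
      ∧ parameters.any (fun x => x == messages.getD 1 "") = true then
    some true
  else
    none

-- ===== PORT B =====
def classic_check_alt (message : String) : Option Bool :=
  let valid : PySem.Set String :=
    PySem.Set.ofList (["start", "stop"].flatMap
      (fun a => ["1", "2", "3", "4"].map (fun p => PySem.Str.join "," [a, p])))
  if PySem.Set.contains valid message then some true else none

-- ===== PRECONDITION & SPEC =====
def Spec_classic_check (message : String) (out : Option Bool) : Prop := out = classic_check_alt message
instance (message : String) (out : Option Bool) : Decidable (Spec_classic_check message out) := by unfold Spec_classic_check; infer_instance

-- ===== CLAIM (what is proved, stated in full; the proofs are below) =====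
def Claim_equal_classic_check : Prop := ∀ (message : String), Dom_classic_check message → Spec_classic_check message (classic_check message)

-- ===== LEMMAS AND PROOFS =====

-- the 8 valid messages B's product set evaluates to
def pvValid : List String :=
  ["start,1", "start,2", "start,3", "start,4", "stop,1", "stop,2", "stop,3", "stop,4"]

lemma alt_eval (message : String) :
    classic_check_alt message = if message ∈ pvValid then some true else none := by
  have hv : PySem.Set.ofList (["start", "stop"].flatMap
      (fun a => ["1", "2", "3", "4"].map (fun p => PySem.Str.join "," [a, p]))) = pvValid := by
    decide
  unfold classic_check_alt
  rw [hv]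
  simp [PySem.Set.contains, pvValid, List.contains_iff]

-- splitOn.go on a chunk not containing the separator character
lemma go_nomem (c : Char) :
    ∀ (s : List Char) (fuel : Nat) (cur : List Char) (acc : List (List Char)) (_ : c ∉ s),
      PySem.Chars.splitOn.go [c] fuel s cur acc = ((cur.reverse ++ s) :: acc).reverse := by
  intro s
  induction s with
  | nil =>
    intro fuel cur acc _
    cases fuel <;> simp [PySem.Chars.splitOn.go]
  | cons h t ih =>
    intro fuel cur acc hn
    cases fuel with
    | zero => simp [PySem.Chars.splitOn.go]
    | succ f =>
      have hne : ¬ [c].isPrefixOf (h :: t) = true := by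
        simp [List.isPrefixOf]
        intro hc; exact (hn (by simp [hc]))
      rw [PySem.Chars.splitOn.go]
      simp only [hne]
      rw [ih f (h :: cur) acc (fun hm => hn (List.mem_cons_of_mem _ hm))]
      simp

-- splitOn.go consumes a separator-free prefix and the separator in one jump
lemma go_mem (c : Char) :
    ∀ (a : List Char) (fuel : Nat) (b cur : List Char) (acc : List (List Char)) (_ : c ∉ a)
      (_ : a.length + 1 ≤ fuel),
      PySem.Chars.splitOn.go [c] fuel (a ++ c :: b) cur acc =
        PySem.Chars.splitOn.go [c] (fuel - (a.length + 1)) b [] ((cur.reverse ++ a) :: acc) := by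
  intro a
  induction a with
  | nil =>
    intro fuel b cur acc _ hf
    cases fuel with
    | zero => omega
    | succ f =>
      rw [PySem.Chars.splitOn.go.eq_def]
      have : [c].isPrefixOf (c :: b) = true := by simp [List.isPrefixOf]
      simp [this]
  | cons h t ih =>
    intro fuel b cur acc hn hf
    cases fuel with
    | zero => simp at hf
    | succ f =>
      have hne : ¬ [c].isPrefixOf (h :: (t ++ c :: b)) = true := by
        simp [List.isPrefixOf]
        intro hc; exact (hn (by simp [hc]))
      rw [List.cons_append, PySem.Chars.splitOn.go]
      simp only [hne]
      rw [ih f b (h :: cur) acc (fun hm => hn (List.mem_cons_of_mem _ hm)) (by simp at hf ⊢; omega)]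
      simp only [List.reverse_cons, List.length_cons]
      have : f - (t.length + 1) = f + 1 - (t.length + 1 + 1) := by omega
      rw [this]
      simp

-- the accumulator only grows: the result has more pieces than acc
lemma go_length (c : Char) :
    ∀ (fuel : Nat) (s cur : List Char) (acc : List (List Char)),
      acc.length + 1 ≤ (PySem.Chars.splitOn.go [c] fuel s cur acc).length := by
  intro fuel
  induction fuel with
  | zero => intro s cur acc; simp [PySem.Chars.splitOn.go]
  | succ f ih =>
    intro s cur acc
    cases s with
    | nil => simp [PySem.Chars.splitOn.go]
    | cons h t =>
      rw [PySem.Chars.splitOn.go]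
      by_cases hp : [c].isPrefixOf (h :: t) = true
      · simp only [hp, if_true]
        have := ih (List.drop 1 (h :: t)) [] (cur.reverse :: acc)
        simp at this ⊢
        omega
      · simp only [hp]
        exact ih t (h :: cur) acc

-- decompose at the FIRST occurrence of c
lemma first_occ {c : Char} {s : List Char} (h : c ∈ s) :
    ∃ a b, s = a ++ c :: b ∧ c ∉ a := by
  induction s with
  | nil => simp at h
  | cons x t ih =>
    by_cases hx : x = c
    · exact ⟨[], t, by simp [hx], by simp⟩
    · have ht : c ∈ t := by
        rcases List.mem_cons.mp h with h1 | h1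
        · exact absurd h1.symm hx
        · exact h1
      obtain ⟨a, b, rfl, hna⟩ := ih ht
      refine ⟨x :: a, b, by simp, ?_⟩
      simp only [List.mem_cons]
      rintro (h2 | h2)
      · exact hx h2.symm
      · exact hna h2

-- a two-piece split reassembles the string around the separator
lemma splitOn_two (c : Char) (s x y : List Char)
    (h : PySem.Chars.splitOn s [c] = [x, y]) :
    s = x ++ c :: y := by
  unfold PySem.Chars.splitOn at h
  by_cases hc : c ∈ s
  · obtain ⟨a, b, rfl, hna⟩ := first_occ hc
    rw [go_mem c a _ b [] [] hna (by simp)] at h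
    by_cases hb : c ∈ b
    · obtain ⟨a2, b2, rfl, hna2⟩ := first_occ hb
      rw [go_mem c a2 _ b2 [] [[].reverse ++ a] hna2 (by simp)] at h
      have := go_length c ((a ++ c :: (a2 ++ c :: b2)).length + 1 - (a.length + 1) - (a2.length + 1))
        b2 [] (([].reverse ++ a2) :: [List.reverse [] ++ a])
      rw [h] at this
      simp at this
    · rw [go_nomem c b _ [] _ hb] at h
      simp at h
      obtain ⟨h1, h2⟩ := h
      rw [h1, h2]
  · rw [go_nomem c s _ [] [] hc] at h
    simp at h

-- ===== VERDICT (by name: the statement is the Claim_ definition above) =====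
theorem classic_check_spec : Claim_equal_classic_check := by
  intro message _
  unfold Spec_classic_check
  rw [alt_eval]
  by_cases hm : message ∈ pvValid
  · rw [if_pos hm]
    simp only [pvValid, List.mem_cons, List.not_mem_nil, or_false] at hm
    rcases hm with rfl | rfl | rfl | rfl | rfl | rfl | rfl | rfl <;> decide
  · rw [if_neg hm]
    unfold classic_check
    have hsplit : PySem.Str.split? message "," =
        some ((PySem.Chars.splitOn message.toList [',']).map String.ofList) := by
      simp [PySem.Str.split?, PySem.Chars.split?]
    simp only [hsplit, Option.getD_some]
    split_ifs with hcond
    · exfalso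
      obtain ⟨hlen, hact, hpar⟩ := hcond
      simp only [List.length_map] at hlen
      obtain ⟨x, y, hxy⟩ := List.length_eq_two.mp hlen
      have hmsg : message.toList = x ++ ',' :: y := splitOn_two ',' _ x y hxy
      rw [hxy] at hact hpar
      simp only [List.map_cons, List.map_nil, List.getD, List.any_cons, List.any_nil,
        Bool.or_false, Bool.or_eq_true, beq_iff_eq] at hact hpar
      have hme : message = String.ofList (x ++ ',' :: y) := by
        rw [← hmsg, String.ofList_toList]
      have hx : x = "start".toList ∨ x = "stop".toList := by
        rcases hact with h | h
        · left; have := congrArg String.toList h.symm; simpa using this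
        · right; have := congrArg String.toList h.symm; simpa using this
      have hy : y = "1".toList ∨ y = "2".toList ∨ y = "3".toList ∨ y = "4".toList := by
        rcases hpar with h | h | h | h
        · left; have := congrArg String.toList h.symm; simpa using this
        · right; left; have := congrArg String.toList h.symm; simpa using this
        · right; right; left; have := congrArg String.toList h.symm; simpa using this
        · right; right; right; have := congrArg String.toList h.symm; simpa using this
      rcases hx with rfl | rfl <;> rcases hy with rfl | rfl | rfl | rfl <;>
        exact hm (by rw [hme]; decide)
    · rfl
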